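-- pv_equiv track=rewrite | github.com/Happy-ryan/PS | 백준/Bronze/22966. 가장 쉬운 문제를 찾는 문제/가장 쉬운 문제를 찾는 문제.py | solution
-- ===== SOURCE A (Python) =====
-- def solution(n, arr):
--     answer = ""
--     max_level = 5
--     for p, level in arr:
--         level = int(level)
--         if level <= max_level:
--             max_level = level
--             answer = p
--
--     return answer
-- ===== SOURCE B (Python) =====
-- def solution(n, arr):
--     # find-min-then-locate: filter levels <= 5, take the minimum level,
--     # then return the last problem carrying that minimum (A's <= tie-break).
--     filtered = [(p, l) for p, level in arr if (l := int(level)) <= 5]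
--     if not filtered:
--         return ""
--     m = min(l for _, l in filtered)
--     for p, l in reversed(filtered):
--         if l == m:
--             return p
-- ===== Notes on version B (the rewrite author's own statement) =====
-- stated objective: alternative
-- what changed: Replaces A's single running-fold (mutable max_level/answer updated with <=) by a find-min-then-locate decomposition: filter entries with int(level) <= 5, compute the minimum level, then scan the filtered list in reverse for the last entry with that level.
import Mathlib
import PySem

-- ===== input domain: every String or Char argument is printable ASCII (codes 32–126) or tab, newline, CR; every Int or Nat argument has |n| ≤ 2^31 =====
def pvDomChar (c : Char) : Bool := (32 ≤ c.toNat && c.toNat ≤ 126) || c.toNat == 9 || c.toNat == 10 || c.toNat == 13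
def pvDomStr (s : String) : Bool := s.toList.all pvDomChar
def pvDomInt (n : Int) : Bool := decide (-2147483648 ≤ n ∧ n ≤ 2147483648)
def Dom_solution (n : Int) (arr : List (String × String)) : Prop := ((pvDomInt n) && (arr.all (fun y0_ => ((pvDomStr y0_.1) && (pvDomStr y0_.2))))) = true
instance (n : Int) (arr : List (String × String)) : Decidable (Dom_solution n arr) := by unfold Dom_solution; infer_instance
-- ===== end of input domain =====

-- B replaces A's running-fold by a find-min-then-locate decomposition (same O(n) cost);
-- equivalence is about the return value on inputs where every level string parses as an int.

-- ===== PORT A =====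
-- A's for-loop over (p, level) with mutable answer/max_level, step for step.
-- int(level) is total-ized with getD 0; Pre_solution excludes inputs where it is none (Python ValueError).
def solutionLoop : List (String × String) → String → Int → String
  | [], answer, _ => answer
  | (p, lv) :: rest, answer, maxLevel =>
    let level := (PySem.Int.ofStr? lv).getD 0
    if level ≤ maxLevel then solutionLoop rest p level
    else solutionLoop rest answer maxLevel

def solution (n : Int) (arr : List (String × String)) : String :=
  solutionLoop arr "" 5

-- ===== PORT B =====
-- Source B's list comprehension: keep (p, int(level)) for entries with int(level) <= 5.
def pvFiltered (arr : List (String × String)) : List (String × Int) :=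
  arr.filterMap (fun pl =>
    let l := (PySem.Int.ofStr? pl.2).getD 0
    if l ≤ 5 then some (pl.1, l) else none)

-- Source B's reversed-scan: first entry (of the reversed list) whose level equals m.
def pvLastMin : List (String × Int) → Int → String
  | [], _ => ""
  | (p, l) :: rest, m => if l = m then p else pvLastMin rest m

def solution_alt (n : Int) (arr : List (String × String)) : String :=
  let filtered := pvFiltered arr
  match PySem.List.min? (filtered.map Prod.snd) (fun x => x) with
  | none => ""
  | some m => pvLastMin filtered.reverse m

-- ===== PRECONDITION & SPEC =====
-- Pre_ excludes exactly the inputs where some level string is not a Python int literal: A raises ValueError there.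
def Pre_solution (n : Int) (arr : List (String × String)) : Prop :=
  (arr.all (fun pl => (PySem.Int.ofStr? pl.2).isSome)) = true
instance (n : Int) (arr : List (String × String)) : Decidable (Pre_solution n arr) := by
  unfold Pre_solution; infer_instance

def pvWitness_solution : Int × (List (String × String)) :=
  (3, [("easy", "2"), ("hard", "9"), ("easier", "2")])

def Spec_solution (n : Int) (arr : List (String × String)) (out : String) : Prop := out = solution_alt n arr
instance (n : Int) (arr : List (String × String)) (out : String) : Decidable (Spec_solution n arr out) := by unfold Spec_solution; infer_instance

-- ===== CLAIM (what is proved, stated in full; the proofs are below) =====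
def Claim_equal_solution : Prop := ∀ (n : Int) (arr : List (String × String)), Dom_solution n arr → Pre_solution n arr → Spec_solution n arr (solution n arr)

-- ===== LEMMAS AND PROOFS =====

-- the filtered list with a generic bound b (B uses b = 5; A's loop lowers the bound as it goes)
def pvFilt (arr : List (String × String)) (b : Int) : List (String × Int) :=
  arr.filterMap (fun pl =>
    let l := (PySem.Int.ofStr? pl.2).getD 0
    if l ≤ b then some (pl.1, l) else none)

-- B's result shape, with a generic bound and default
def pvSpec (F : List (String × Int)) (ans : String) : String :=
  match PySem.List.min? (F.map Prod.snd) (fun x => x) with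
  | none => ans
  | some m => pvLastMin F.reverse m

lemma pvLastMin_append_no_match (xs ys : List (String × Int)) (m : Int)
    (h : ∀ pl ∈ xs, pl.2 ≠ m) : pvLastMin (xs ++ ys) m = pvLastMin ys m := by
  induction xs with
  | nil => rfl
  | cons x t ih =>
    obtain ⟨p, l⟩ := x
    simp only [List.cons_append, pvLastMin]
    rw [if_neg (by exact fun hl => h (p, l) (List.mem_cons_self) hl)]
    exact ih (fun pl hpl => h pl (List.mem_cons_of_mem _ hpl))

lemma pvLastMin_append_match (xs ys : List (String × Int)) (m : Int)
    (h : ∃ pl ∈ xs, pl.2 = m) : pvLastMin (xs ++ ys) m = pvLastMin xs m := by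
  induction xs with
  | nil => simp at h
  | cons x t ih =>
    obtain ⟨p, l⟩ := x
    simp only [List.cons_append, pvLastMin]
    by_cases hl : l = m
    · rw [if_pos hl, if_pos hl]
    · rw [if_neg hl, if_neg hl]
      apply ih
      obtain ⟨pl, hpl, hplm⟩ := h
      rcases List.mem_cons.mp hpl with h1 | h1
      · exact absurd (by rw [h1] at hplm; exact hplm) hl
      · exact ⟨pl, h1, hplm⟩

lemma pvLastMin_filter (xs : List (String × Int)) (q : String × Int → Bool) (m : Int)
    (h : ∀ pl : String × Int, pl.2 = m → q pl = true) :
    pvLastMin (xs.filter q) m = pvLastMin xs m := by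
  induction xs with
  | nil => rfl
  | cons x t ih =>
    obtain ⟨p, l⟩ := x
    by_cases hq : q (p, l) = true
    · simp only [List.filter_cons, hq, if_pos, pvLastMin, ih]
    · have hl : l ≠ m := fun hl => hq (h (p, l) hl)
      simp only [List.filter_cons, hq, Bool.false_eq_true, if_false, pvLastMin, if_neg hl]
      exact ih

lemma pvFilt_filter (arr : List (String × String)) (b c : Int) (hcb : c ≤ b) :
    pvFilt arr c = (pvFilt arr b).filter (fun pl => decide (pl.2 ≤ c)) := by
  induction arr with
  | nil => rfl
  | cons x rest ih =>
    obtain ⟨p, lv⟩ := x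
    simp only [pvFilt, List.filterMap_cons] at *
    by_cases hc : (PySem.Int.ofStr? lv).getD 0 ≤ c
    · rw [if_pos hc, if_pos (le_trans hc hcb)]
      simp only [List.filter_cons, hc, decide_true, if_pos]
      exact congrArg _ ih
    · rw [if_neg hc]
      by_cases hb : (PySem.Int.ofStr? lv).getD 0 ≤ b
      · rw [if_pos hb]
        simp only [List.filter_cons, hc, decide_false]
        exact ih
      · rw [if_neg hb]; exact ih

lemma pvFilt_le (arr : List (String × String)) (b : Int) :
    ∀ pl ∈ pvFilt arr b, pl.2 ≤ b := by
  induction arr with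
  | nil => simp [pvFilt]
  | cons x rest ih =>
    obtain ⟨p, lv⟩ := x
    simp only [pvFilt, List.filterMap_cons]
    by_cases hb : (PySem.Int.ofStr? lv).getD 0 ≤ b
    · rw [if_pos hb]
      intro pl hpl
      rcases List.mem_cons.mp hpl with h1 | h1
      · subst h1; exact hb
      · exact ih pl h1
    · rw [if_neg hb]; exact ih

-- the key invariant: A's loop, from any state, computes B's shape on the bound-filtered rest
lemma loop_char (arr : List (String × String)) :
    ∀ (ans : String) (maxl : Int), solutionLoop arr ans maxl = pvSpec (pvFilt arr maxl) ans := by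
  induction arr with
  | nil => intro ans maxl; rfl
  | cons x rest ih =>
    obtain ⟨p, lv⟩ := x
    intro ans maxl
    simp only [solutionLoop]
    set l := (PySem.Int.ofStr? lv).getD 0 with hldef
    by_cases hc : l ≤ maxl
    · rw [if_pos hc, ih p l]
      have hcons : pvFilt ((p, lv) :: rest) maxl = (p, l) :: pvFilt rest maxl := by
        simp only [pvFilt, List.filterMap_cons, ← hldef, if_pos hc]
      rw [hcons]
      set G := pvFilt rest maxl with hG
      have hsub : pvFilt rest l = G.filter (fun pl => decide (pl.2 ≤ l)) :=
        pvFilt_filter rest maxl l hc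
      rcases hmin : PySem.List.min? (((p, l) :: G).map Prod.snd) (fun x => x) with _ | m
      · exact absurd ((PySem.List.min?_eq_none_iff _ _).mp hmin) (by simp)
      have hmem := PySem.List.min?_mem hmin
      have hml : m ≤ l := PySem.List.min?_isMin hmin l (by simp)
      rcases hGmin : PySem.List.min? ((pvFilt rest l).map Prod.snd) (fun x => x) with _ | m'
      · -- filtered rest is empty: every member of G has level > l, so the min is l, the answer is p
        have hGe : pvFilt rest l = [] := by
          have := (PySem.List.min?_eq_none_iff _ _).mp hGmin
          simpa using this
        have hgt : ∀ pl ∈ G, ¬ pl.2 ≤ l := by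
          intro pl hpl hle
          have hmem2 : pl ∈ pvFilt rest l := by
            rw [hsub]; exact List.mem_filter.mpr ⟨hpl, by simpa using hle⟩
          simp [hGe] at hmem2
        have hm : m = l := by
          simp only [List.map_cons, List.mem_cons, List.mem_map] at hmem
          rcases hmem with h1 | ⟨pl, hpl, h2⟩
          · exact h1
          · exact absurd (h2 ▸ hml) (fun hle => hgt pl hpl hle)
        subst hm
        simp only [pvSpec, hGe, List.map_nil, hmin, List.reverse_cons]
        rw [show PySem.List.min? ([] : List Int) (fun x => x) = none from rfl]
        rw [pvLastMin_append_no_match G.reverse [(p, l)] l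
          (by intro pl hpl h; exact hgt pl (List.mem_reverse.mp hpl) (le_of_eq h))]
        simp [pvLastMin]
      · -- filtered rest nonempty: the two minima agree and the reverse scans agree
        obtain ⟨pl0, hpl0, hpl0m⟩ := List.mem_map.mp (PySem.List.min?_mem hGmin)
        have hpl0G : pl0 ∈ G := by
          rw [hsub] at hpl0; exact (List.mem_filter.mp hpl0).1
        have hm'le : m' ≤ l := hpl0m ▸ pvFilt_le rest l pl0 hpl0
        have hmm' : m = m' := by
          apply le_antisymm
          · exact PySem.List.min?_isMin hmin m' (by
              simp only [List.map_cons, List.mem_cons]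
              exact Or.inr (List.mem_map.mpr ⟨pl0, hpl0G, hpl0m⟩))
          · simp only [List.map_cons, List.mem_cons, List.mem_map] at hmem
            rcases hmem with h1 | ⟨pl, hpl, h2⟩
            · exact h1 ▸ hm'le
            · by_cases hple : pl.2 ≤ l
              · have hplf : pl ∈ pvFilt rest l := by
                  rw [hsub]; exact List.mem_filter.mpr ⟨hpl, by simpa using hple⟩
                have := PySem.List.min?_isMin hGmin pl.2
                  (List.mem_map.mpr ⟨pl, hplf, rfl⟩)
                exact h2 ▸ this
              · omega
        subst hmm'
        simp only [pvSpec, hGmin, hmin, List.reverse_cons]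
        rw [pvLastMin_append_match G.reverse [(p, l)] m
          ⟨pl0, List.mem_reverse.mpr hpl0G, hpl0m⟩]
        rw [hsub, ← List.filter_reverse]
        exact pvLastMin_filter G.reverse (fun pl => decide (pl.2 ≤ l)) m
          (by intro pl h; simp [h, hm'le])
    · rw [if_neg hc, ih ans maxl]
      have : pvFilt ((p, lv) :: rest) maxl = pvFilt rest maxl := by
        simp only [pvFilt, List.filterMap_cons, ← hldef, if_neg hc]
      rw [this]

-- ===== VERDICT (by name: the statement is the Claim_ definition above) =====
theorem solution_spec : Claim_equal_solution := by
  intro n arr _ _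
  unfold Spec_solution solution solution_alt
  rw [loop_char arr "" 5]
  rfl
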